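-- pv_equiv track=rewrite | github.com/Poikilos/linux-preinstall | linuxpreinstall/__init__.py | find_unquoted
-- ===== SOURCE A (Python) =====
-- def find_unquoted(haystack, needle, quotes=['"']):
--     in_quote = None
--     for i in range(len(haystack)):
--         char = haystack[i]
--         at_quote = None
--         for iq in range(len(quotes)):
--             if char == quotes[iq]:
--                 at_quote = quotes[iq]
--                 break
--         if in_quote is None:
--             # not in a quote
--             if at_quote is not None:
--                 # Start a quote.
--                 in_quote = at_quote
--             elif haystack[i:i+len(needle)] == needle:
--                 # char is not a quote, and the needle is here.
--                 return i
--         elif at_quote is not None: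
--             # in a quote, but this char is a quote, so
--             # end the quote.
--             in_quote = None
--     return -1
-- ===== SOURCE B (Python) =====
-- def find_unquoted(haystack, needle, quotes=['"']):
--     # One pass precomputes, per index, whether it lies outside any quoted
--     # region (quote characters themselves are never eligible); then the
--     # C-speed str.find engine skips between candidate matches.
--     qset = {q for q in quotes if len(q) == 1}
--     allowed = []
--     inq = False
--     for ch in haystack:
--         if ch in qset:
--             allowed.append(False)
--             inq = not inq
--         else:
--             allowed.append(not inq)
--     n = len(haystack)
--     pos = haystack.find(needle)
--     while pos != -1 and pos < n:
--         if allowed[pos]: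
--             return pos
--         pos = haystack.find(needle, pos + 1)
--     return -1
-- ===== Notes on version B (the rewrite author's own statement) =====
-- stated objective: faster
-- what changed: Replaces A's per-index scan (which at every unquoted index compares an m-char slice against the needle) with a single pass precomputing a per-index outside-quotes mask and then jumping between needle occurrences with str.find, checking only the mask at each candidate.
import Mathlib
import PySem

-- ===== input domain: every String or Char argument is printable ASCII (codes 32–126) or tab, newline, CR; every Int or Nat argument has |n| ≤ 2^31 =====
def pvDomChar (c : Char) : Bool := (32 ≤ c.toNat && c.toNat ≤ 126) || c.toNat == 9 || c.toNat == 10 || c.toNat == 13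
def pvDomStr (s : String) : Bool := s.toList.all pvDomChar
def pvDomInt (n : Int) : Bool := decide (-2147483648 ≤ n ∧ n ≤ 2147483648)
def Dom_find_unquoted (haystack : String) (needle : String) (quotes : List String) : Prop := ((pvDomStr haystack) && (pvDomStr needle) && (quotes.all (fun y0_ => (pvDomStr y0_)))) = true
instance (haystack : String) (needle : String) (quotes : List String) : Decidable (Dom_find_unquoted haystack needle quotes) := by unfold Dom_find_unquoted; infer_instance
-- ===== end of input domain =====

-- B replaces A's per-index needle comparison with a precomputed quote mask plus
-- substring-search jumps (str.find); equal return value on all inputs (A is total).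

-- ===== PORT A =====
-- inner loop: 'for iq in range(len(quotes)): if char == quotes[iq]: at_quote = quotes[iq]; break'
def fuA_atQuote (char : Char) : List String → Option String
  | [] => none
  | q :: qs => if String.ofList [char] = q then some q else fuA_atQuote char qs

-- outer loop over i in range(len(haystack)), walking the suffix haystack[i:];
-- haystack[i:i+len(needle)] is exactly (suffix).take needle.length (PySem.List.slice_natCast_add).
def fuA_loop (needle : List Char) (quotes : List String) : List Char → Nat → Option String → Int
  | [], _, _ => -1
  | c :: rest, i, inq =>
    match inq, fuA_atQuote c quotes with
    | none, some q => fuA_loop needle quotes rest (i+1) (some q)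
    | none, none =>
        if (c :: rest).take needle.length = needle then (i : Int)
        else fuA_loop needle quotes rest (i+1) none
    | some _, some _ => fuA_loop needle quotes rest (i+1) none
    | some q, none => fuA_loop needle quotes rest (i+1) (some q)

def find_unquoted (haystack : String) (needle : String) (quotes : List String) : Int :=
  fuA_loop needle.toList quotes haystack.toList 0 none

-- ===== PORT B =====
-- 'for ch in haystack: if ch in qset: allowed.append(False); inq = not inq else: allowed.append(not inq)'
def fuB_allowed (qmem : Char → Bool) : List Char → Bool → List Bool
  | [], _ => []
  | c :: rest, inq =>
    if qmem c then false :: fuB_allowed qmem rest (!inq)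
    else (!inq) :: fuB_allowed qmem rest inq

-- 'while pos != -1 and pos < n: …'; fuel (strictly more than the number of
-- possible candidate positions) only makes the loop total — no path change.
def fuB_loop (hs needle : List Char) (allowed : List Bool) : Nat → Int → Int
  | 0, _ => -1
  | fuel+1, pos =>
    if pos = -1 ∨ (hs.length : Int) ≤ pos then -1
    else if allowed.getD pos.toNat false then pos
    else fuB_loop hs needle allowed fuel (PySem.Chars.findFrom hs needle (pos + 1) none)

def find_unquoted_alt (haystack : String) (needle : String) (quotes : List String) : Int :=
  let hs := haystack.toList
  let qset : PySem.Set String := PySem.Set.ofList (quotes.filter (fun q => PySem.Str.len q == 1))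
  let allowed := fuB_allowed (fun c => PySem.Set.contains qset (String.ofList [c])) hs false
  fuB_loop hs needle.toList allowed (hs.length + 1) (PySem.Chars.find hs needle.toList)

-- ===== PRECONDITION & SPEC =====
def Spec_find_unquoted (haystack : String) (needle : String) (quotes : List String) (out : Int) : Prop := out = find_unquoted_alt haystack needle quotes
instance (haystack : String) (needle : String) (quotes : List String) (out : Int) : Decidable (Spec_find_unquoted haystack needle quotes out) := by unfold Spec_find_unquoted; infer_instance

-- ===== CLAIM (what is proved, stated in full; the proofs are below) =====
def Claim_equal_find_unquoted : Prop := ∀ (haystack : String) (needle : String) (quotes : List String), Dom_find_unquoted haystack needle quotes → Spec_find_unquoted haystack needle quotes (find_unquoted haystack needle quotes)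

-- ===== LEMMAS AND PROOFS =====

-- reference: first index k with (outside quotes ∧ needle matches), by linear scan
def fuRef (hs needle : List Char) (allowed : List Bool) (k : Nat) : Int :=
  if _h : k < hs.length then
    if allowed.getD k false ∧ (hs.drop k).take needle.length = needle then (k : Int)
    else fuRef hs needle allowed (k+1)
  else -1
termination_by hs.length - k

-- intermediate: A's scan re-expressed against a precomputed mask list
def fuScan (needle : List Char) : List Char → Nat → List Bool → Int
  | [], _, _ => -1
  | c :: rest, i, al =>
    if al.headD false ∧ (c :: rest).take needle.length = needle then (i : Int)
    else fuScan needle rest (i+1) al.tail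

theorem fuA_atQuote_isSome (c : Char) (quotes : List String) :
    (fuA_atQuote c quotes).isSome =
      PySem.Set.contains (PySem.Set.ofList (quotes.filter (fun q => PySem.Str.len q == 1))) (String.ofList [c]) := by
  have h1 : ∀ l, (fuA_atQuote c l).isSome = decide (String.ofList [c] ∈ l) := by
    intro l; induction l with
    | nil => simp [fuA_atQuote]
    | cons q qs ih =>
      by_cases h : String.ofList [c] = q <;> simp [fuA_atQuote, h, ih]
  rw [h1]
  by_cases h : String.ofList [c] ∈ quotes
  · rw [(PySem.Set.contains_iff _ _).mpr ((PySem.Set.mem_ofList _ _).mpr (List.mem_filter.mpr ⟨h, by simp [pysem]⟩))]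
    simp [h]
  · have hnm : ¬ (String.ofList [c] ∈ PySem.Set.ofList (quotes.filter (fun q => PySem.Str.len q == 1))) := by
      rw [PySem.Set.mem_ofList _ _]; intro hmem; exact h (List.mem_filter.mp hmem).1
    cases hc : PySem.Set.contains (PySem.Set.ofList (quotes.filter (fun q => PySem.Str.len q == 1))) (String.ofList [c])
    · simp [h]
    · exact absurd ((PySem.Set.contains_iff _ _).mp hc) hnm

theorem fuA_eq_fuScan (needle : List Char) (quotes : List String) (qmem : Char → Bool)
    (hq : ∀ c, (fuA_atQuote c quotes).isSome = qmem c) :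
    ∀ (cs : List Char) (i : Nat) (inq : Option String),
      fuA_loop needle quotes cs i inq = fuScan needle cs i (fuB_allowed qmem cs inq.isSome) := by
  intro cs
  induction cs with
  | nil => intro i inq; simp [fuA_loop, fuScan]
  | cons c rest ih =>
    intro i inq
    have hqc := hq c
    cases hA : fuA_atQuote c quotes with
    | some q =>
      have hm : qmem c = true := by rw [← hqc, hA]; rfl
      cases inq with
      | none => simp [fuA_loop, hA, fuScan, fuB_allowed, hm, ih]
      | some p => simp [fuA_loop, hA, fuScan, fuB_allowed, hm, ih]
    | none =>
      have hm : qmem c = false := by rw [← hqc, hA]; rfl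
      cases inq with
      | none => simp [fuA_loop, hA, fuScan, fuB_allowed, hm, ih]
      | some p => simp [fuA_loop, hA, fuScan, fuB_allowed, hm, ih]

theorem fuScan_eq_fuRef (needle hs : List Char) (al : List Bool) :
    ∀ k, fuScan needle (hs.drop k) k (al.drop k) = fuRef hs needle al k := by
  have main : ∀ d k, hs.length - k ≤ d →
      fuScan needle (hs.drop k) k (al.drop k) = fuRef hs needle al k := by
    intro d
    induction d with
    | zero =>
      intro k hk
      have hk' : hs.length ≤ k := by omega
      rw [fuRef]; simp [List.drop_eq_nil_of_le hk', fuScan, hk']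
    | succ d ih =>
      intro k hk
      by_cases h : k < hs.length
      · rw [List.drop_eq_getElem_cons h, fuScan, fuRef]
        have h1 : (al.drop k).headD false = al.getD k false := by
          simp [List.head?_drop, List.getD]
        have h2 : (al.drop k).tail = al.drop (k+1) := by
          rw [← List.drop_drop]; simp
        rw [h1, h2, ← List.drop_eq_getElem_cons h]
        simp only [dif_pos h]
        split_ifs with hc
        · rfl
        · exact ih (k+1) (by omega)
      · have hk' : hs.length ≤ k := by omega
        rw [fuRef]; simp [List.drop_eq_nil_of_le hk', fuScan, hk']
  intro k; exact main (hs.length - k) k le_rfl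

theorem fuRef_none (hs needle : List Char) (al : List Bool) (k : Nat)
    (h : ∀ j, k ≤ j → ¬ needle <+: hs.drop j) : fuRef hs needle al k = -1 := by
  have main : ∀ d k, hs.length - k ≤ d → (∀ j, k ≤ j → ¬ needle <+: hs.drop j) →
      fuRef hs needle al k = -1 := by
    intro d
    induction d with
    | zero => intro k hk _; rw [fuRef]; simp; omega
    | succ d ih =>
      intro k hk h
      rw [fuRef]
      by_cases hlt : k < hs.length
      · have hnp : ¬ (hs.drop k).take needle.length = needle := by
          intro he; exact h k le_rfl (List.prefix_iff_eq_take.mpr he.symm)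
        simp only [dif_pos hlt, hnp, and_false, if_false]
        exact ih (k+1) (by omega) (fun j hj => h j (by omega))
      · simp [hlt]
  exact main (hs.length - k) k le_rfl h

theorem fuRef_skip (hs needle : List Char) (al : List Bool) :
    ∀ (j k : Nat), k ≤ j → (∀ i, k ≤ i → i < j → ¬ needle <+: hs.drop i) →
      fuRef hs needle al k = fuRef hs needle al j := by
  have main : ∀ d j k, j - k ≤ d → k ≤ j → (∀ i, k ≤ i → i < j → ¬ needle <+: hs.drop i) →
      fuRef hs needle al k = fuRef hs needle al j := by
    intro d
    induction d with
    | zero => intro j k h1 h2 _; have : j = k := by omega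
              rw [this]
    | succ d ih =>
      intro j k h1 h2 h
      by_cases he : k = j
      · rw [he]
      · have hkj : k < j := by omega
        by_cases hlt : k < hs.length
        · have hnp : ¬ (hs.drop k).take needle.length = needle := by
            intro hx; exact h k le_rfl hkj (List.prefix_iff_eq_take.mpr hx.symm)
          rw [fuRef]
          simp only [dif_pos hlt, hnp, and_false, if_false]
          exact ih j (k+1) (by omega) (by omega) (fun i hi1 hi2 => h i (by omega) hi2)
        · have hj : ¬ j < hs.length := by omega
          rw [fuRef]; simp only [dif_neg hlt]
          rw [fuRef]; simp [hj]
  intro j k h1 h2; exact main (j - k) j k le_rfl h1 h2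

theorem fuB_eq_fuRef (hs needle : List Char) (al : List Bool) :
    ∀ (fuel k : Nat), k ≤ hs.length → hs.length + 1 - k ≤ fuel →
      fuB_loop hs needle al fuel (PySem.Chars.findFrom hs needle (k : Int) none) =
        fuRef hs needle al k := by
  intro fuel
  induction fuel with
  | zero => intro k hk hf; omega
  | succ f ih =>
    intro k hk hf
    by_cases hp : PySem.Chars.findFrom hs needle (k : Int) none = -1
    · have hni : ¬ needle <:+: hs.drop k :=
        (PySem.Chars.findFrom_natCast_eq_neg_one_iff hs needle k hk).mp hp
      rw [hp, fuB_loop, if_pos (Or.inl rfl)]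
      symm
      apply fuRef_none
      intro j hj hpre
      apply hni
      have hdj : hs.drop j = (hs.drop k).drop (j - k) := by
        rw [List.drop_drop]; congr 1; omega
      exact hpre.isInfix.trans (by rw [hdj]; exact (List.drop_suffix _ _).isInfix)
    · obtain ⟨hkp, hpref, hmin⟩ := PySem.Chars.findFrom_natCast_spec hs needle k hk hp
      have hform := PySem.Chars.findFrom_natCast hs needle k hk
      by_cases hq : PySem.Chars.find (hs.drop k) needle = -1
      · rw [hform, if_pos hq] at hp; exact absurd rfl hp
      · have hq0 : 0 ≤ PySem.Chars.find (hs.drop k) needle := by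
          have := PySem.Chars.neg_one_le_find (hs.drop k) needle
          omega
        have hqle : PySem.Chars.find (hs.drop k) needle ≤ ((hs.drop k).length : Int) :=
          PySem.Chars.find_le_length (hs.drop k) needle
        set p := PySem.Chars.findFrom hs needle (k : Int) none with hpdef
        have hpval : p = (k : Int) + PySem.Chars.find (hs.drop k) needle := by
          rw [hform, if_neg hq]
        have hp0 : 0 ≤ p := by omega
        have hple : p ≤ (hs.length : Int) := by
          rw [hpval]
          have : ((hs.drop k).length : Int) = (hs.length : Int) - k := by
            simp [List.length_drop]; omega
          omega
        have hjp : ((p.toNat : Nat) : Int) = p := Int.toNat_of_nonneg hp0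
        have hkj : k ≤ p.toNat := by omega
        have hjle : p.toNat ≤ hs.length := by omega
        have hskip : fuRef hs needle al k = fuRef hs needle al p.toNat :=
          fuRef_skip hs needle al p.toNat k hkj hmin
      -- unfold one loop step
        rw [fuB_loop]
        by_cases hend : p.toNat = hs.length
        · have : (hs.length : Int) ≤ p := by omega
          simp only [if_pos (Or.inr this)]
          rw [hskip, hend, fuRef]; simp
        · have hjlt : p.toNat < hs.length := by omega
          have hnotend : ¬ (p = -1 ∨ (hs.length : Int) ≤ p) := by
            rintro (h1 | h2) <;> omega
          rw [if_neg hnotend]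
          have htake : (hs.drop p.toNat).take needle.length = needle :=
            (List.prefix_iff_eq_take.mp hpref).symm
          by_cases hal : al.getD p.toNat false
          · rw [if_pos hal, hskip, fuRef]
            simp only [dif_pos hjlt]
            rw [if_pos ⟨hal, htake⟩, hjp]
          · rw [if_neg hal]
            have hsucc : p + 1 = (((p.toNat + 1 : Nat)) : Int) := by omega
            rw [hsucc, ih (p.toNat + 1) (by omega) (by omega), hskip]
            conv_rhs => rw [fuRef]
            rw [dif_pos hjlt, if_neg (fun hc => hal hc.1)]

-- ===== VERDICT (by name: the statement is the Claim_ definition above) =====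
theorem find_unquoted_spec : Claim_equal_find_unquoted := by
  intro haystack needle quotes _
  unfold Spec_find_unquoted find_unquoted find_unquoted_alt
  simp only []
  rw [fuA_eq_fuScan needle.toList quotes
        (fun c => PySem.Set.contains (PySem.Set.ofList (quotes.filter (fun q => PySem.Str.len q == 1))) (String.ofList [c]))
        (fun c => fuA_atQuote_isSome c quotes) haystack.toList 0 none]
  have h1 := fuScan_eq_fuRef needle.toList haystack.toList
      (fuB_allowed (fun c => PySem.Set.contains (PySem.Set.ofList (quotes.filter (fun q => PySem.Str.len q == 1))) (String.ofList [c])) haystack.toList false) 0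
  simp only [List.drop_zero] at h1
  have h2 := fuB_eq_fuRef haystack.toList needle.toList
      (fuB_allowed (fun c => PySem.Set.contains (PySem.Set.ofList (quotes.filter (fun q => PySem.Str.len q == 1))) (String.ofList [c])) haystack.toList false)
      (haystack.toList.length + 1) 0 (by omega) (by omega)
  simp only [Nat.cast_zero, PySem.Chars.findFrom_zero] at h2
  rw [show (Option.isSome (none : Option String)) = false from rfl, h1, ← h2]
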